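-- pv_equiv track=rewrite | github.com/ProspectForge/lead-generator | src/brand_grouper.py | _names_are_related
-- ===== SOURCE A (Python) =====
-- def _names_are_related(names: list[str]) -> bool:
--     """Check if names share a common prefix (indicating same brand)."""
--     if not names or len(names) < 2:
--         return True
--
--     # Find shortest common prefix
--     sorted_names = sorted(names, key=len)
--     shortest = sorted_names[0]
--
--     # Check if all names start with the shortest one (or vice versa)
--     for name in names:
--         # At least 3 chars must match at start
--         prefix_len = 0
--         for i, (c1, c2) in enumerate(zip(shortest, name)):
--             if c1 == c2:
--                 prefix_len = i + 1
--             else: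
--                 break
--
--         if prefix_len < 3:
--             return False
--
--     return True
-- ===== SOURCE B (Python) =====
-- def _names_are_related(names: list[str]) -> bool:
--     """Check if names share a common prefix (indicating same brand)."""
--     if len(names) < 2:
--         return True
--     if any(len(name) < 3 for name in names):
--         return False
--     return len({name[:3] for name in names}) == 1
-- ===== Notes on version B (the rewrite author's own statement) =====
-- stated objective: simpler
-- what changed: Replaces the sort-by-length plus per-name character-matching inner loop with a closed-form check: all names have length >= 3 and the set of 3-character prefixes is a singleton.
import Mathlib
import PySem

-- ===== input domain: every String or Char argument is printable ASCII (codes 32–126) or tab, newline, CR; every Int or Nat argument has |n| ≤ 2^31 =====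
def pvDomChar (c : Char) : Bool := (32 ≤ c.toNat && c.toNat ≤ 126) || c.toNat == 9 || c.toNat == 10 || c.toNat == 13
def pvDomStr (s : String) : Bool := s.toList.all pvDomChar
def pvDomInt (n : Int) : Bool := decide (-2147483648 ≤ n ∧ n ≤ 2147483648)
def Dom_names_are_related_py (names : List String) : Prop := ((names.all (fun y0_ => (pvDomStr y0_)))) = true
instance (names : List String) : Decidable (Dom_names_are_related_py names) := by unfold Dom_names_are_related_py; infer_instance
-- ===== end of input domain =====

-- B replaces A's sort-for-shortest and per-character inner matching loop by a closed-form
-- check (all lengths ≥ 3 and the set of 3-char prefixes is a singleton); same return value.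

-- ===== PORT A =====
-- inner loop: for i,(c1,c2) in enumerate(zip(shortest,name)): if c1==c2: prefix_len=i+1 else break
def pvAPrefixLen : List (Char × Char) → Nat → Nat → Nat
  | [], _, acc => acc
  | (c1, c2) :: rest, i, acc => if c1 == c2 then pvAPrefixLen rest (i + 1) (i + 1) else acc

-- outer loop with the early 'return False'
def pvACheck (shortest : List Char) : List String → Bool
  | [] => true
  | name :: rest =>
      if pvAPrefixLen (shortest.zip name.toList) 0 0 < 3 then false
      else pvACheck shortest rest

def names_are_related_py (names : List String) : Bool :=
  if names.isEmpty || names.length < 2 then true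
  else
    match PySem.List.sorted names (fun n => n.toList.length) false with
    | [] => true  -- unreachable: names is nonempty here
    | shortest :: _ => pvACheck shortest.toList names

-- ===== PORT B =====
def names_are_related_py_alt (names : List String) : Bool :=
  if names.length < 2 then true
  else if names.any (fun name => name.toList.length < 3) then false
  else (PySem.Set.ofList (names.map (fun name => name.toList.take 3))).length == 1
  -- name[:3] is exactly toList.take 3 (PySem.List.slice_to_natCast)

-- ===== PRECONDITION & SPEC =====
def Spec_names_are_related_py (names : List String) (out : Bool) : Prop := out = names_are_related_py_alt names
instance (names : List String) (out : Bool) : Decidable (Spec_names_are_related_py names out) := by unfold Spec_names_are_related_py; infer_instance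

-- ===== CLAIM (what is proved, stated in full; the proofs are below) =====
def Claim_equal_names_are_related_py : Prop := ∀ (names : List String), Dom_names_are_related_py names → Spec_names_are_related_py names (names_are_related_py names)

-- ===== LEMMAS AND PROOFS =====

-- common-prefix length, the mathematical form of A's inner loop
def pvCP : List Char → List Char → Nat
  | c1 :: as, c2 :: bs => if c1 = c2 then pvCP as bs + 1 else 0
  | _, _ => 0

theorem pvAPrefixLen_eq (a b : List Char) : ∀ i, pvAPrefixLen (a.zip b) i i = i + pvCP a b := by
  induction a generalizing b with
  | nil => intro i; simp [pvAPrefixLen, pvCP]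
  | cons c1 as ih =>
    intro i
    cases b with
    | nil => simp [pvAPrefixLen, pvCP]
    | cons c2 bs =>
      by_cases h : c1 = c2
      · simp [pvAPrefixLen, pvCP, h, ih bs (i + 1)]; omega
      · simp [pvAPrefixLen, pvCP, h]

theorem pvCP_le_left (a b : List Char) : pvCP a b ≤ a.length := by
  induction a generalizing b with
  | nil => simp [pvCP]
  | cons c1 as ih =>
    cases b with
    | nil => simp [pvCP]
    | cons c2 bs =>
      by_cases h : c1 = c2 <;> simp [pvCP, h]
      exact ih bs

theorem pvCP_ge_iff (k : Nat) (a b : List Char) :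
    k ≤ pvCP a b ↔ (a.take k = b.take k ∧ k ≤ a.length ∧ k ≤ b.length) := by
  induction a generalizing b k with
  | nil =>
    cases k <;> simp [pvCP]
  | cons c1 as ih =>
    cases b with
    | nil => cases k <;> simp [pvCP]
    | cons c2 bs =>
      cases k with
      | zero => simp
      | succ j =>
        by_cases h : c1 = c2
        · subst h
          simp [pvCP, ih j bs]
        · simp [pvCP, h]

theorem pvACheck_eq_all (shortest : List Char) (l : List String) :
    pvACheck shortest l = l.all (fun n => decide (3 ≤ pvCP shortest n.toList)) := by
  induction l with
  | nil => rfl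
  | cons n rest ih =>
    simp only [pvACheck, pvAPrefixLen_eq shortest n.toList 0, List.all_cons, ← ih]
    by_cases h : 3 ≤ pvCP shortest n.toList
    · simp [h, Nat.not_lt.mpr h]
    · simp [h, Nat.lt_of_not_le h]

-- a PySem set built from a nonempty list is a singleton iff all elements coincide
theorem pvSet_len_one {α : Type} [BEq α] [LawfulBEq α] (x : α) (xs : List α) :
    (PySem.Set.ofList (x :: xs)).length = 1 ↔ ∀ y ∈ x :: xs, y = x := by
  constructor
  · intro h y hy
    have hmem : y ∈ PySem.Set.ofList (x :: xs) := (PySem.Set.mem_ofList _ _).mpr hy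
    have hx : x ∈ PySem.Set.ofList (x :: xs) := (PySem.Set.mem_ofList _ _).mpr (by simp)
    obtain ⟨z, hz⟩ := List.length_eq_one_iff.mp h
    rw [hz] at hmem hx
    simp at hmem hx
    rw [hmem, hx]
  · intro h
    have hnd := PySem.Set.nodup_ofList (x :: xs)
    have hx : x ∈ PySem.Set.ofList (x :: xs) := (PySem.Set.mem_ofList _ _).mpr (by simp)
    have hall : ∀ y ∈ PySem.Set.ofList (x :: xs), y = x := by
      intro y hy
      exact h y ((PySem.Set.mem_ofList _ _).mp hy)
    cases hs : PySem.Set.ofList (x :: xs) with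
    | nil => rw [hs] at hx; simp at hx
    | cons a t =>
      cases t with
      | nil => rfl
      | cons b t2 =>
        rw [hs] at hall hnd
        have ha : a = x := hall a (by simp)
        have hb : b = x := hall b (by simp)
        simp [ha, hb] at hnd

-- ===== VERDICT (by name: the statement is the Claim_ definition above) =====
theorem names_are_related_py_spec : Claim_equal_names_are_related_py := by
  intro names _
  unfold Spec_names_are_related_py names_are_related_py names_are_related_py_alt
  by_cases hlen : names.length < 2
  · simp [hlen]
  · have hne : names ≠ [] := by
      intro h; subst h; simp at hlen
    rw [if_neg (by simp [hne, hlen]), if_neg (by simp [hlen])]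
    cases hs : PySem.List.sorted names (fun n => n.toList.length) false with
    | nil => exact absurd ((PySem.List.sorted_eq_nil_iff _ _ _).mp hs) hne
    | cons shortest t =>
      have hmin : ∀ y ∈ names, shortest.toList.length ≤ y.toList.length :=
        PySem.List.key_head_sorted_le names (fun n => n.toList.length) hs
      have hsmem : shortest ∈ names := by
        have : shortest ∈ PySem.List.sorted names (fun n => n.toList.length) false := by
          rw [hs]; simp
        exact ((PySem.List.mem_sorted _ _ _ _).mp this)
      change pvACheck shortest.toList names = _
      rw [pvACheck_eq_all]
      obtain ⟨n0, rest, rfl⟩ := List.exists_cons_of_ne_nil hne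
      by_cases hshort : (n0 :: rest).any (fun name => decide (name.toList.length < 3))
      · -- some name shorter than 3: both sides are false
        simp only [hshort, if_true]
        obtain ⟨m, hm, hml⟩ := List.any_eq_true.mp hshort
        have hsl : shortest.toList.length < 3 :=
          Nat.lt_of_le_of_lt (hmin m hm) (by simpa using hml)
        apply List.all_eq_false.mpr
        refine ⟨n0, by simp, ?_⟩
        simp only [decide_eq_true_eq, not_le] at *
        exact Nat.lt_of_le_of_lt (pvCP_le_left _ _) hsl
      · -- all names have length ≥ 3
        simp only [hshort, if_false, Bool.false_eq_true]
        have hge : ∀ y ∈ n0 :: rest, 3 ≤ y.toList.length := by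
          intro y hy
          by_contra hc
          exact hshort (List.any_eq_true.mpr ⟨y, hy, by simpa using Nat.lt_of_not_le hc⟩)
        have hmap : (n0 :: rest).map (fun name => name.toList.take 3)
            = (n0.toList.take 3) :: rest.map (fun name => name.toList.take 3) := by simp
        rw [hmap]
        -- both sides say: every name's 3-char prefix equals a fixed one
        have key : ∀ y ∈ n0 :: rest,
            (3 ≤ pvCP shortest.toList y.toList ↔ y.toList.take 3 = shortest.toList.take 3) := by
          intro y hy
          rw [pvCP_ge_iff]
          constructor
          · rintro ⟨h1, _, _⟩; exact h1.symm
          · intro h1; exact ⟨h1.symm, hge shortest hsmem, hge y hy⟩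
        by_cases hall : ∀ y ∈ n0 :: rest, y.toList.take 3 = shortest.toList.take 3
        · have hA : ((n0 :: rest).all (fun n => decide (3 ≤ pvCP shortest.toList n.toList))) = true := by
            apply List.all_eq_true.mpr
            intro y hy
            exact decide_eq_true ((key y hy).mpr (hall y hy))
          have hB : (PySem.Set.ofList ((n0.toList.take 3) :: rest.map (fun name => name.toList.take 3))).length = 1 := by
            apply (pvSet_len_one _ _).mpr
            intro y hy
            rcases List.mem_cons.mp hy with h | h
            · exact h
            · obtain ⟨z, hz, rfl⟩ := List.mem_map.mp h
              rw [hall z (by simp [hz]), hall n0 (by simp)]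
          simp [hA, hB]
        · push Not at hall
          obtain ⟨w, hw, hwne⟩ := hall
          have hA : ((n0 :: rest).all (fun n => decide (3 ≤ pvCP shortest.toList n.toList))) = false := by
            apply List.all_eq_false.mpr
            exact ⟨w, hw, by simp [key w hw, hwne]⟩
          have hB : (PySem.Set.ofList ((n0.toList.take 3) :: rest.map (fun name => name.toList.take 3))).length ≠ 1 := by
            intro h
            have := (pvSet_len_one _ _).mp h
            have hw3 : w.toList.take 3 = n0.toList.take 3 := by
              rcases List.mem_cons.mp hw with h' | h'
              · rw [h']
              · exact this _ (by simp [List.mem_map]; exact Or.inr ⟨w, h', rfl⟩)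
            have hs3 : shortest.toList.take 3 = n0.toList.take 3 := by
              rcases List.mem_cons.mp hsmem with h' | h'
              · rw [h']
              · exact this _ (by simp [List.mem_map]; exact Or.inr ⟨shortest, h', rfl⟩)
            exact hwne (hw3.trans hs3.symm)
          simp [hA, hB]
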